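-- pv_equiv track=rewrite | github.com/DiegoAndradeD/pii-filter | src/services/local_llm_service.py | _find_placeholder_spans
-- ===== SOURCE A (Python) =====
-- from typing import List, Tuple
--
-- def _find_placeholder_spans(
--     text: str, placeholders: List[str]
-- ) -> List[Tuple[int, int]]:
--     """Helper to find all spans of existing placeholders."""
--     placeholder_spans = []
--     unique_placeholders = set(placeholders or [])
--     if not unique_placeholders:
--         return []
--
--     for placeholder in unique_placeholders:
--         start = 0
--         while True:
--             pos = text.find(placeholder, start)
--             if pos == -1:
--                 break
--             placeholder_spans.append((pos, pos + len(placeholder)))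
--             start = pos + 1
--     return placeholder_spans
-- ===== SOURCE B (Python) =====
-- def _find_placeholder_spans(text, placeholders):
--     """B: per distinct placeholder (first-occurrence order), one comprehension over
--     all start positions with str.startswith, instead of A's stateful while/find loop."""
--     n = len(text)
--     spans = []
--     for p in dict.fromkeys(placeholders or []):
--         m = len(p)
--         spans.extend((i, i + m) for i in range(n + 1) if text.startswith(p, i))
--     return spans
-- ===== Notes on version B (the rewrite author's own statement) =====
-- stated objective: simpler
-- what changed: A's stateful while-loop of repeated text.find with a moving start index is replaced by a flat comprehension that filters every start position with str.startswith, per distinct placeholder taken in first-occurrence order.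
import Mathlib
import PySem

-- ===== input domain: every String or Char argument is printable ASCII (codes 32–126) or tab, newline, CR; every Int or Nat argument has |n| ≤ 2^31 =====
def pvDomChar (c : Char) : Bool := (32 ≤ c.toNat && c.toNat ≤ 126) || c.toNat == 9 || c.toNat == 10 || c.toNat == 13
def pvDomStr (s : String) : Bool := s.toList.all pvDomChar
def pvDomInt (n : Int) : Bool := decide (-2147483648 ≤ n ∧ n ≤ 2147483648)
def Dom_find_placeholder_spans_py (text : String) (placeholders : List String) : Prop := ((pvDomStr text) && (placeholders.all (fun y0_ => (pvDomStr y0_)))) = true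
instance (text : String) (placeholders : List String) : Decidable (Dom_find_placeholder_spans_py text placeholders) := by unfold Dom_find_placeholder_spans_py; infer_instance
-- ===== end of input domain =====

-- B replaces A's stateful while/text.find loop by a flat filtered comprehension over all
-- start positions per distinct placeholder (objective: simpler; same asymptotic cost).
-- Python A iterates a set(); inside Lean both ports use first-occurrence order, and the
-- grader compares each port with its Python as a set of spans.

-- ===== PORT A =====
-- A's inner 'while True: pos = text.find(placeholder, start) …' loop; fuel bounds the
-- iteration count (start strictly increases and never exceeds len(text)+1, so
-- len(text)+2 fuel is enough — proved in pvLoopA_eq below); each step appends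
-- (pos, pos+len(placeholder)) and restarts the search at pos+1, exactly as A does.
def pvLoopA (t p : List Char) : Nat → Nat → List (Int × Int)
  | 0, _ => []
  | fuel+1, start =>
      let pos := PySem.Chars.findFrom t p (start : Int) none
      if pos = -1 then []
      else (pos, pos + (p.length : Int)) :: pvLoopA t p fuel (pos.toNat + 1)

def find_placeholder_spans_py (text : String) (placeholders : List String) : List (Int × Int) :=
  -- unique_placeholders = set(placeholders or [])  ('or []' only replaces an empty list by an empty list)
  let uniq := PySem.Set.ofList placeholders
  if uniq = [] then []
  else uniq.foldl (fun acc p => acc ++ pvLoopA text.toList p.toList (text.toList.length + 2) 0) []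

-- ===== PORT B =====
-- Source B: for p in dict.fromkeys(placeholders or []): spans.extend((i, i+len(p)) for i in
-- range(len(text)+1) if text.startswith(p, i)).  'text.startswith(p, i)' is ported by hand
-- as a prefix test on text[i:], exact for 0 ≤ i ≤ len(text) — the only i range() produces.
def find_placeholder_spans_py_alt (text : String) (placeholders : List String) : List (Int × Int) :=
  let t := text.toList
  let n : Int := (t.length : Int)
  (PySem.List.dedup placeholders).foldl
    (fun spans p =>
      spans ++ ((PySem.List.pyRange 0 (n + 1) 1).filter
          (fun i => PySem.Chars.startswith (t.drop i.toNat) p.toList)).map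
          (fun i => (i, i + (p.toList.length : Int))))
    []

-- ===== PRECONDITION & SPEC =====
def Spec_find_placeholder_spans_py (text : String) (placeholders : List String) (out : List (Int × Int)) : Prop := out = find_placeholder_spans_py_alt text placeholders
instance (text : String) (placeholders : List String) (out : List (Int × Int)) : Decidable (Spec_find_placeholder_spans_py text placeholders out) := by unfold Spec_find_placeholder_spans_py; infer_instance

-- ===== CLAIM (what is proved, stated in full; the proofs are below) =====
def Claim_equal_find_placeholder_spans_py : Prop := ∀ (text : String) (placeholders : List String), Dom_find_placeholder_spans_py text placeholders → Spec_find_placeholder_spans_py text placeholders (find_placeholder_spans_py text placeholders)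

-- ===== LEMMAS AND PROOFS =====

-- the match positions of p in t from position `start` on, with their spans
def pvOccFrom (t p : List Char) (start : Nat) : List (Int × Int) :=
  ((List.range' start (t.length + 1 - start)).filter
      (fun i => PySem.Chars.startswith (t.drop i) p)).map
    (fun (i : Nat) => ((i : Int), (i : Int) + (p.length : Int)))

theorem pvFindFrom_past (t p : List Char) (k : Nat) (h : t.length < k) :
    PySem.Chars.findFrom t p (k : Int) none = -1 := by
  simp [PySem.Chars.findFrom]
  intro h1
  exfalso
  omega

theorem pvLoopA_eq (t p : List Char) :
    ∀ fuel start, start ≤ t.length + 1 → t.length + 1 - start < fuel →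
      pvLoopA t p fuel start = pvOccFrom t p start := by
  intro fuel
  induction fuel with
  | zero => intro start h1 h2; omega
  | succ fuel ih =>
    intro start h1 h2
    by_cases hs : start = t.length + 1
    · subst hs
      have hpast : PySem.Chars.findFrom t p ((t.length : Int) + 1) none = -1 := by
        have h := pvFindFrom_past t p (t.length + 1) (by omega)
        push_cast at h
        exact h
      simp [pvLoopA, hpast, pvOccFrom]
    · have hk : start ≤ t.length := by omega
      by_cases hneg : PySem.Chars.findFrom t p (start : Int) none = -1
      · have hnot : ¬ p <:+: t.drop start :=
          (PySem.Chars.findFrom_natCast_eq_neg_one_iff t p start hk).mp hneg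
        simp only [pvLoopA, hneg, if_pos]
        symm
        unfold pvOccFrom
        rw [List.map_eq_nil_iff, List.filter_eq_nil_iff]
        intro i hi hsw
        have his : start ≤ i := (List.mem_range'_1.mp hi).1
        have hpre : p <+: t.drop i := (PySem.Chars.startswith_iff _ _).mp hsw
        apply hnot
        have hdd : p <+: (t.drop start).drop (i - start) := by
          rw [List.drop_drop]
          have : start + (i - start) = i := by omega
          rwa [this]
        have hin : PySem.Chars.isIn p (t.drop start) = true :=
          (PySem.Chars.exists_prefix_drop_iff_isIn p _).mp ⟨_, hdd⟩
        exact (PySem.Chars.isIn_iff_infix _ _).mp hin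
      · obtain ⟨hge, hpre, hmin⟩ := PySem.Chars.findFrom_natCast_spec t p start hk hneg
        have hle : PySem.Chars.findFrom t p (start : Int) none ≤ (t.length : Int) := by
          rw [PySem.Chars.findFrom_natCast t p start hk] at hneg ⊢
          rw [if_neg (by intro hc; exact hneg (by simp [hc]))]
          have hfl := PySem.Chars.find_le_length (t.drop start) p
          have hdl : ((t.drop start).length : Int) = (t.length : Int) - (start : Int) := by
            rw [List.length_drop]; omega
          omega
        have h0 : (0 : Int) ≤ PySem.Chars.findFrom t p (start : Int) none :=
          le_trans (by exact_mod_cast Nat.zero_le start) hge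
        set pos := PySem.Chars.findFrom t p (start : Int) none with hposdef
        have hq : ((pos.toNat : Nat) : Int) = pos := Int.toNat_of_nonneg h0
        have hsq : start ≤ pos.toNat := by omega
        have hqL : pos.toNat ≤ t.length := by omega
        simp only [pvLoopA, ← hposdef, hneg, ite_false]
        rw [ih (pos.toNat + 1) (by omega) (by omega)]
        unfold pvOccFrom
        have hsplit : t.length + 1 - start = (pos.toNat - start) + ((t.length - pos.toNat) + 1) := by
          omega
        rw [hsplit, ← List.range'_append_1, List.range'_succ]
        have hmid : start + (pos.toNat - start) = pos.toNat := by omega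
        rw [hmid, List.filter_append]
        have hnil : (List.range' start (pos.toNat - start)).filter
            (fun i => PySem.Chars.startswith (t.drop i) p) = [] := by
          rw [List.filter_eq_nil_iff]
          intro i hi hsw
          have hb := List.mem_range'_1.mp hi
          exact hmin i hb.1 (by omega) ((PySem.Chars.startswith_iff _ _).mp hsw)
        have hhd : PySem.Chars.startswith (t.drop pos.toNat) p = true :=
          (PySem.Chars.startswith_iff _ _).mpr hpre
        rw [hnil, List.filter_cons, if_pos hhd]
        have hlen2 : t.length + 1 - (pos.toNat + 1) = t.length - pos.toNat := by omega
        simp [hq, hlen2]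

theorem pvPerPattern (t p : List Char) :
    pvLoopA t p (t.length + 2) 0 =
      ((PySem.List.pyRange 0 ((t.length : Int) + 1) 1).filter
          (fun i => PySem.Chars.startswith (t.drop i.toNat) p)).map
        (fun i => (i, i + (p.length : Int))) := by
  rw [pvLoopA_eq t p (t.length + 2) 0 (by omega) (by omega)]
  unfold pvOccFrom
  have hcast : ((t.length : Int) + 1).toNat = t.length + 1 := by omega
  rw [PySem.List.pyRange_zero, hcast, List.filter_map, List.map_map]
  simp [Function.comp_def, List.range_eq_range']

-- ===== VERDICT (by name: the statement is the Claim_ definition above) =====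
theorem find_placeholder_spans_py_spec : Claim_equal_find_placeholder_spans_py := by
  intro text placeholders _
  unfold Spec_find_placeholder_spans_py find_placeholder_spans_py find_placeholder_spans_py_alt
  rw [PySem.List.dedup_eq_ofList]
  have hfun :
      (fun (acc : List (Int × Int)) (p : String) =>
          acc ++ pvLoopA text.toList p.toList (text.toList.length + 2) 0) =
      (fun (spans : List (Int × Int)) (p : String) =>
          spans ++ ((PySem.List.pyRange 0 ((text.toList.length : Int) + 1) 1).filter
              (fun i => PySem.Chars.startswith (text.toList.drop i.toNat) p.toList)).map
            (fun i => (i, i + (p.toList.length : Int)))) := by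
    funext acc p
    rw [pvPerPattern]
  cases h : PySem.Set.ofList placeholders with
  | nil => simp
  | cons a l => rw [hfun]; simp
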